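-- pv_equiv track=rewrite | github.com/shakey0/PythonBasics | visible_on_dice.py | total_amount_visible
-- ===== SOURCE A (Python) =====
-- def total_amount_visible(top_num, num_of_sides):
--     all_sides = []
--     counter = 1
--     while counter <= num_of_sides:
--         all_sides.append(counter)
--         counter += 1
--     all_sides_rev = []
--     counter = num_of_sides
--     while counter > 0:
--         all_sides_rev.append(counter)
--         counter -= 1
--     total_sum = 0
--     for num in all_sides:
--         total_sum += num
--     index_of = all_sides.index(top_num)
--     total_sum -= all_sides_rev[index_of]
--     return total_sum
-- ===== SOURCE B (Python) =====
-- def total_amount_visible(top_num, num_of_sides):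
--     if not (1 <= top_num <= num_of_sides):
--         raise ValueError(f"{top_num} is not in list")
--     return num_of_sides * (num_of_sides + 1) // 2 - (num_of_sides - top_num + 1)
-- ===== Notes on version B (the rewrite author's own statement) =====
-- stated objective: faster
-- what changed: replaces the two list-building while loops, the summation loop and the list.index scan by the closed-form triangular number n(n+1)//2 minus the opposite face (n - top_num + 1), with a range check where A's list.index would raise
import Mathlib
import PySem

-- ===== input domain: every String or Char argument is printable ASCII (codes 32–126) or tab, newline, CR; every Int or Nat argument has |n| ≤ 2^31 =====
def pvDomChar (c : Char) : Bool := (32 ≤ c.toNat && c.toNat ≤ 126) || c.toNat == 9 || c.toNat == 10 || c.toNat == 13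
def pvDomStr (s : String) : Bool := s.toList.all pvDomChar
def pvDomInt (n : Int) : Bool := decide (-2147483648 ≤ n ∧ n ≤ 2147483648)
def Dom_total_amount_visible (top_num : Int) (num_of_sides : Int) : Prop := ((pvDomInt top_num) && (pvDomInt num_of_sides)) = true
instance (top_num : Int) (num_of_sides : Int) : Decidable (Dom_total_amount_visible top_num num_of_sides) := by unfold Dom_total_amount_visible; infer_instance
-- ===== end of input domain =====

-- B replaces A's list building, summation loop and index scan by the closed form
-- n(n+1)//2 - (n - top_num + 1); equivalence of return values proved on 1 ≤ top_num ≤ num_of_sides.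

-- ===== PORT A =====
-- while counter <= num_of_sides: all_sides.append(counter); counter += 1
-- (append modelled by a cons-accumulator with a final reverse, so the loop is tail-recursive)
def pvBuildUp (acc : List Int) (counter : Int) (num_of_sides : Int) : List Int :=
  if counter ≤ num_of_sides then pvBuildUp (counter :: acc) (counter + 1) num_of_sides
  else acc.reverse
termination_by (num_of_sides + 1 - counter).toNat
decreasing_by omega

-- while counter > 0: all_sides_rev.append(counter); counter -= 1   (same accumulator shape)
def pvBuildDown (acc : List Int) (counter : Int) : List Int :=
  if counter > 0 then pvBuildDown (counter :: acc) (counter - 1)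
  else acc.reverse
termination_by counter.toNat
decreasing_by omega

def total_amount_visible (top_num : Int) (num_of_sides : Int) : Int :=
  let all_sides := pvBuildUp [] 1 num_of_sides
  let all_sides_rev := pvBuildDown [] num_of_sides
  let total_sum := all_sides.foldl (· + ·) 0
  match PySem.List.index? all_sides top_num with
  | none => 0  -- ValueError in Python: excluded by Pre_
  | some i => total_sum - (PySem.List.pyGet? all_sides_rev (i : Int)).getD 0

-- ===== PORT B =====
def total_amount_visible_alt (top_num : Int) (num_of_sides : Int) : Int :=
  if 1 ≤ top_num ∧ top_num ≤ num_of_sides then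
    PySem.Int.floordiv (num_of_sides * (num_of_sides + 1)) 2 - (num_of_sides - top_num + 1)
  else 0  -- ValueError in Python: excluded by Pre_

-- ===== PRECONDITION & SPEC =====
-- A raises ValueError (list.index fails) exactly when top_num is not one of the faces 1..num_of_sides.
def Pre_total_amount_visible (top_num : Int) (num_of_sides : Int) : Prop :=
  1 ≤ top_num ∧ top_num ≤ num_of_sides
instance (top_num : Int) (num_of_sides : Int) : Decidable (Pre_total_amount_visible top_num num_of_sides) := by
  unfold Pre_total_amount_visible; infer_instance

def pvWitness_total_amount_visible : Int × Int := (3, 6)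

def Spec_total_amount_visible (top_num : Int) (num_of_sides : Int) (out : Int) : Prop := out = total_amount_visible_alt top_num num_of_sides
instance (top_num : Int) (num_of_sides : Int) (out : Int) : Decidable (Spec_total_amount_visible top_num num_of_sides out) := by unfold Spec_total_amount_visible; infer_instance

-- ===== CLAIM (what is proved, stated in full; the proofs are below) =====
def Claim_equal_total_amount_visible : Prop := ∀ (top_num : Int) (num_of_sides : Int), Dom_total_amount_visible top_num num_of_sides → Pre_total_amount_visible top_num num_of_sides → Spec_total_amount_visible top_num num_of_sides (total_amount_visible top_num num_of_sides)

-- ===== LEMMAS AND PROOFS =====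

-- structural (cons-first) reference versions of the two loops, used only in the proofs
def pvUp (counter : Int) (num_of_sides : Int) : List Int :=
  if counter ≤ num_of_sides then counter :: pvUp (counter + 1) num_of_sides else []
termination_by (num_of_sides + 1 - counter).toNat
decreasing_by omega

def pvDown (counter : Int) : List Int :=
  if counter > 0 then counter :: pvDown (counter - 1) else []
termination_by counter.toNat
decreasing_by omega

theorem pvBuildUp_eq (n : Int) : ∀ (c : Int) (acc : List Int),
    pvBuildUp acc c n = acc.reverse ++ pvUp c n := by
  intro c
  induction c using pvUp.induct n with
  | case1 c hc ih =>
    intro acc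
    rw [pvBuildUp, if_pos hc, pvUp, if_pos hc, ih]
    simp
  | case2 c hc =>
    intro acc
    rw [pvBuildUp, if_neg hc, pvUp, if_neg hc]
    simp

theorem pvBuildDown_eq : ∀ (c : Int) (acc : List Int),
    pvBuildDown acc c = acc.reverse ++ pvDown c := by
  intro c
  induction c using pvDown.induct with
  | case1 c hc ih =>
    intro acc
    rw [pvBuildDown, if_pos hc, pvDown, if_pos hc, ih]
    simp
  | case2 c hc =>
    intro acc
    rw [pvBuildDown, if_neg hc, pvDown, if_neg hc]
    simp

theorem pvSum_up (n : Int) : ∀ (c : Int),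
    2 * (pvUp c n).sum = if c ≤ n then n * (n + 1) - (c - 1) * c else 0 := by
  intro c
  induction c using pvUp.induct n with
  | case1 c hc ih =>
    rw [pvUp, if_pos hc, List.sum_cons, if_pos hc]
    by_cases h2 : c + 1 ≤ n
    · rw [if_pos h2] at ih; nlinarith [ih]
    · rw [if_neg h2] at ih
      have he : pvUp (c + 1) n = [] := by rw [pvUp, if_neg h2]
      have hcn : c = n := by omega
      subst hcn; rw [he]; simp; ring
  | case2 c hc =>
    rw [pvUp, if_neg hc, if_neg hc]; simp

theorem pvIndex_up (n : Int) : ∀ (c t : Int), c ≤ t → t ≤ n →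
    PySem.List.index? (pvUp c n) t = some (t - c).toNat := by
  intro c
  induction c using pvUp.induct n with
  | case1 c hc ih =>
    intro t h1 h2
    rw [pvUp, if_pos hc]
    by_cases he : c = t
    · subst he
      rw [PySem.List.index?_cons_self]
      simp
    · rw [PySem.List.index?_cons_of_ne _ he, ih t (by omega) h2]
      simp; omega
  | case2 c hc =>
    intro t h1 h2; omega

theorem pvGet_down : ∀ (i : Nat) (n : Int), (i : Int) < n →
    PySem.List.pyGet? (pvDown n) (i : Int) = some (n - i) := by
  intro i
  induction i with
  | zero =>
    intro n h
    rw [pvDown, if_pos (by omega)]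
    norm_num [PySem.List.pyGet?_zero_cons]
  | succ k ih =>
    intro n h
    rw [pvDown, if_pos (by omega)]
    have : ((k + 1 : Nat) : Int) = (k : Int) + 1 := by push_cast; ring
    rw [this, PySem.List.pyGet?_cons_succ, ih (n - 1) (by omega)]
    congr 1; omega

-- ===== VERDICT (by name: the statement is the Claim_ definition above) =====
theorem total_amount_visible_spec : Claim_equal_total_amount_visible := by
  intro t n _ hpre
  obtain ⟨h1, h2⟩ := hpre
  unfold Spec_total_amount_visible total_amount_visible total_amount_visible_alt
  simp only []
  rw [if_pos ⟨h1, h2⟩]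
  have hu : pvBuildUp [] 1 n = pvUp 1 n := by rw [pvBuildUp_eq]; simp
  have hd : pvBuildDown [] n = pvDown n := by rw [pvBuildDown_eq]; simp
  rw [hu, hd]
  rw [pvIndex_up n 1 t h1 h2]
  have hget : PySem.List.pyGet? (pvDown n) (((t - 1).toNat : Nat) : Int) = some (n - (t - 1).toNat) :=
    pvGet_down (t - 1).toNat n (by omega)
  simp only [hget, Option.getD_some]
  have hfold : (pvUp 1 n).foldl (· + ·) 0 = (pvUp 1 n).sum := List.sum_eq_foldl.symm
  rw [hfold]
  have hsum := pvSum_up n 1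
  rw [if_pos (by omega : (1:Int) ≤ n)] at hsum
  have hdiv : PySem.Int.floordiv (n * (n + 1)) 2 = (n * (n + 1)) / 2 :=
    PySem.Int.floordiv_eq_ediv_of_pos (by omega)
  rw [hdiv]
  have htn : ((t - 1).toNat : Int) = t - 1 := by omega
  rw [htn]
  omega
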